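-- pv_equiv track=rewrite | github.com/muneebaifrah/Unstop-100-Days-Coding-Sprint | Day-60/2.Word_form_or_not_by_string_problem.py | canFormStrings
-- ===== SOURCE A (Python) =====
-- def canFormStrings(s, arr):
--     freq = {}
--     for ch in s:
--         freq[ch] = freq.get(ch, 0) + 1
--
--     for word in arr:
--         temp = freq.copy()
--         for ch in word:
--             if temp.get(ch, 0) == 0:
--                 return False
--             temp[ch] -= 1
--     return True
-- ===== SOURCE B (Python) =====
-- def canFormStrings(s, arr):
--     def counts(t):
--         d = {}
--         for ch in t:
--             d[ch] = d.get(ch, 0) + 1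
--         return d
--     have = counts(s)
--     return all(
--         all(n <= have.get(ch, 0) for ch, n in counts(word).items())
--         for word in arr
--     )
-- ===== Notes on version B (the rewrite author's own statement) =====
-- stated objective: simpler
-- what changed: Instead of copying the frequency dict per word and decrementing it char-by-char with an inline early return, B counts each word's letters once and compares the two count tables (multiset containment).
import Mathlib
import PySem

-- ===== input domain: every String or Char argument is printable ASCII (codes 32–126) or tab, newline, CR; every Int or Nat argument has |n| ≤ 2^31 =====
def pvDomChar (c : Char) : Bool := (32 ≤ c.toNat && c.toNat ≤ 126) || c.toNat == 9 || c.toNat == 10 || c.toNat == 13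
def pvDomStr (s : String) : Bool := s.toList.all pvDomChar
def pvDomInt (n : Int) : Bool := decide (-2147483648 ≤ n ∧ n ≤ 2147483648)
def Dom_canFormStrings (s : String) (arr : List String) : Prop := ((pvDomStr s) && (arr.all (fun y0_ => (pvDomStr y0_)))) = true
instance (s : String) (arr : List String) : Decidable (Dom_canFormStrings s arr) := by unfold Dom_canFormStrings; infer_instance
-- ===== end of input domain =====

-- ===== PORT A =====
-- B replaces A's per-word dict copy + decrement loop with a count-and-compare multiset test (return value only; objective: simpler).

-- inner loop of A: 'for ch in word: if temp.get(ch,0)==0: return False; temp[ch]-=1'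
def pvInnerA (temp : PySem.Dict Char Int) : List Char → Bool
  | [] => true
  | ch :: rest =>
    if temp.getD ch 0 == 0 then false
    else pvInnerA (temp.modify ch 0 (· - 1)) rest

-- outer loop of A: 'for word in arr: … return False / fall through to return True'
def pvOuterA (freq : PySem.Dict Char Int) : List String → Bool
  | [] => true
  | word :: rest =>
    if pvInnerA freq word.toList then pvOuterA freq rest else false

def canFormStrings (s : String) (arr : List String) : Bool :=
  let freq := s.toList.foldl (fun d ch => d.insert ch (d.getD ch 0 + 1)) PySem.Dict.empty
  pvOuterA freq arr

-- ===== PORT B =====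
-- helper 'counts' of Source B: a letter-count table
def pvCounts (t : List Char) : PySem.Dict Char Int :=
  t.foldl (fun d ch => d.insert ch (d.getD ch 0 + 1)) PySem.Dict.empty

def canFormStrings_alt (s : String) (arr : List String) : Bool :=
  let haveD := pvCounts s.toList
  arr.all (fun word =>
    (pvCounts word.toList).items.all (fun p => p.2 ≤ haveD.getD p.1 0))


-- ===== PRECONDITION & SPEC =====
def Spec_canFormStrings (s : String) (arr : List String) (out : Bool) : Prop := out = canFormStrings_alt s arr
instance (s : String) (arr : List String) (out : Bool) : Decidable (Spec_canFormStrings s arr out) := by unfold Spec_canFormStrings; infer_instance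

-- ===== CLAIM (what is proved, stated in full; the proofs are below) =====
def Claim_equal_canFormStrings : Prop := ∀ (s : String) (arr : List String), Dom_canFormStrings s arr → Spec_canFormStrings s arr (canFormStrings s arr)

-- ===== LEMMAS AND PROOFS =====

-- A's inner loop succeeds iff every character's count in the word fits the (nonnegative) budget
lemma pvInnerA_iff (w : List Char) (temp : PySem.Dict Char Int)
    (h : ∀ c, 0 ≤ temp.getD c 0) :
    pvInnerA temp w = true ↔ ∀ c, (w.count c : Int) ≤ temp.getD c 0 := by
  induction w generalizing temp with
  | nil =>
    simp only [pvInnerA, List.count_nil, Nat.cast_zero, true_iff]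
    exact h
  | cons ch rest ih =>
    by_cases h0 : temp.getD ch 0 = 0
    · simp only [pvInnerA, h0, beq_self_eq_true, if_true, Bool.false_eq_true, false_iff,
        not_forall]
      refine ⟨ch, ?_⟩
      rw [h0, List.count_cons_self]
      push_cast; omega
    · have hmod : ∀ c, (temp.modify ch 0 (fun x => x - 1)).getD c 0
          = if c = ch then temp.getD ch 0 - 1 else temp.getD c 0 :=
        fun c => PySem.Dict.getD_modify temp ch c 0 (fun x => x - 1)
      have hnn' : ∀ c, 0 ≤ (temp.modify ch 0 (fun x => x - 1)).getD c 0 := by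
        intro c; rw [hmod c]; split_ifs with hc
        · have := h ch; omega
        · exact h c
      rw [pvInnerA, if_neg (by simp [h0]), ih _ hnn']
      constructor
      · intro hall c
        have hc' := hall c
        rw [hmod c] at hc'
        rw [List.count_cons]
        by_cases hc : c = ch
        · subst hc
          rw [if_pos rfl] at hc'
          rw [if_pos (by simp)]
          push_cast at hc' ⊢; omega
        · rw [if_neg (by simp [Ne.symm hc]), add_zero]
          rw [if_neg hc] at hc'; exact hc'
      · intro hall c
        have hc' := hall c
        rw [List.count_cons] at hc'
        rw [hmod c]
        by_cases hc : c = ch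
        · subst hc
          rw [if_pos (by simp)] at hc'
          rw [if_pos rfl]
          push_cast at hc' ⊢; omega
        · rw [if_neg (by simp [Ne.symm hc]), add_zero] at hc'
          rw [if_neg hc]; exact hc'

lemma pvFreq_getD (s : String) (c : Char) :
    (s.toList.foldl (fun d ch => d.insert ch (d.getD ch 0 + 1))
        (PySem.Dict.empty : PySem.Dict Char Int)).getD c 0
      = (s.toList.count c : Int) := by
  simp [PySem.Dict.getD_foldl_insert_add_one]

-- ===== VERDICT (by name: the statement is the Claim_ definition above) =====
theorem canFormStrings_spec : Claim_equal_canFormStrings := by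
  intro s arr hdom
  clear hdom
  unfold Spec_canFormStrings canFormStrings canFormStrings_alt
  have hnn : ∀ c, (0 : Int) ≤ (s.toList.foldl (fun d ch => d.insert ch (d.getD ch 0 + 1))
      (PySem.Dict.empty : PySem.Dict Char Int)).getD c 0 := by
    intro c; rw [pvFreq_getD]; positivity
  have hcounter : ∀ t : List Char, pvCounts t = PySem.Dict.counter t :=
    fun t => PySem.Dict.foldl_insert_getD_add_one_eq_counter t
  have hword : ∀ w : String,
      pvInnerA (s.toList.foldl (fun d ch => d.insert ch (d.getD ch 0 + 1))
          (PySem.Dict.empty : PySem.Dict Char Int)) w.toList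
        = (pvCounts w.toList).items.all (fun p => p.2 ≤ (pvCounts s.toList).getD p.1 0) := by
    intro w
    rw [Bool.eq_iff_iff, pvInnerA_iff _ _ hnn, hcounter, PySem.Dict.items_counter]
    simp only [List.all_map, List.all_eq_true, PySem.Set.mem_ofList, Function.comp_apply,
      decide_eq_true_eq]
    have hgetD : ∀ c : Char, (pvCounts s.toList).getD c 0 = (s.toList.count c : Int) :=
      fun c => pvFreq_getD s c
    constructor
    · intro hall c _
      have := hall c; rw [pvFreq_getD] at this; rw [hgetD]; exact this
    · intro hall c
      rw [pvFreq_getD]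
      by_cases hc : c ∈ w.toList
      · have := hall c hc; rw [hgetD] at this; exact this
      · rw [List.count_eq_zero_of_not_mem hc]; push_cast; positivity
  induction arr with
  | nil => rfl
  | cons w rest ih =>
    simp only [pvOuterA, List.all_cons]
    rw [hword w, ih]
    cases hb : (pvCounts w.toList).items.all
      (fun p => p.2 ≤ (pvCounts s.toList).getD p.1 0) <;> simp
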